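-- pv_equiv track=rewrite | github.com/Voyaga/proposal60 | templates/proposal_builder.py | build_fallback_proposal
-- ===== SOURCE A (Python) =====
-- def build_fallback_proposal(data: dict) -> str:
--     """Deterministic fallback proposal (no AI)."""
--
--     client = data.get("client_name", "Client").strip()
--     service = data.get("service_type", "the requested work").strip()
--     scope = data.get("scope", "").strip()
--     price = data.get("price", "").strip()
--     timeframe = data.get("timeframe", "").strip()
--     business = data.get("your_business", "").strip()
--
--     lines = []
--
--     # ---- Header ----
--     lines.append(f"Proposal for: {client}")
--     lines.append("")
--
--     # ---- Overview ----
--     lines.append("1. Overview")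
--     if business:
--         lines.append(
--             f"This proposal outlines the scope of works for {service} to be carried out by {business}. "
--             "The work will be completed in accordance with standard trade practices and applicable requirements."
--         )
--     else:
--         lines.append(
--             f"This proposal outlines the scope of works for {service}. "
--             "The work will be completed in accordance with standard trade practices and applicable requirements."
--         )
--     lines.append("")
--
--     # ---- Scope of Work ----
--     lines.append("2. Scope of Work")
--     if scope:
--         for line in scope.splitlines():
--             clean = line.lstrip("- ").strip()
--             if clean:
--                 lines.append(f"- {clean}")
--     else:
--         lines.append("- Details to be confirmed")
--     lines.append("")
--
--     # ---- Optional Timeframe ----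
--     section_index = 3
--     if timeframe:
--         lines.append(f"{section_index}. Timeframe")
--         lines.append(timeframe)
--         lines.append("")
--         section_index += 1
--
--     # ---- Pricing ----
--     lines.append(f"{section_index}. Pricing")
--     if price:
--         lines.append(price)
--     else:
--         lines.append("Pricing to be confirmed.")
--     lines.append("")
--     section_index += 1
--
--     # ---- Acceptance ----
--     lines.append(f"{section_index}. Acceptance / Next Steps")
--     lines.append(
--         "Please review the details above and contact us by phone or email "
--         "to confirm acceptance or discuss any questions."
--     )
--     lines.append("")
--     lines.append("Kind regards,")
--     if business:
--         lines.append(business)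
--
--     return "\n".join(lines)
-- ===== SOURCE B (Python) =====
-- def build_fallback_proposal(data: dict) -> str:
--     """Deterministic fallback proposal (no AI)."""
--
--     def get(key, default=""):
--         return data.get(key, default).strip()
--
--     client = get("client_name", "Client")
--     service = get("service_type", "the requested work")
--     scope = get("scope")
--     price = get("price")
--     timeframe = get("timeframe")
--     business = get("your_business")
--
--     by = f" to be carried out by {business}" if business else ""
--     overview = [
--         f"This proposal outlines the scope of works for {service}{by}. "
--         "The work will be completed in accordance with standard trade practices and applicable requirements."
--     ]
--     if scope:
--         scope_body = [f"- {c}" for c in (l.lstrip("- ").strip() for l in scope.splitlines()) if c]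
--     else:
--         scope_body = ["- Details to be confirmed"]
--
--     sections = [("Overview", overview), ("Scope of Work", scope_body)]
--     if timeframe:
--         sections.append(("Timeframe", [timeframe]))
--     sections.append(("Pricing", [price or "Pricing to be confirmed."]))
--     sections.append((
--         "Acceptance / Next Steps",
--         ["Please review the details above and contact us by phone or email "
--          "to confirm acceptance or discuss any questions."],
--     ))
--
--     out = [f"Proposal for: {client}", ""]
--     for i, (title, body) in enumerate(sections, 1):
--         out.append(f"{i}. {title}")
--         out.extend(body)
--         out.append("")
--     out.append("Kind regards,")
--     if business:
--         out.append(business)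
--     return "\n".join(out)
-- ===== Notes on version B (the rewrite author's own statement) =====
-- stated objective: alternative
-- what changed: Replaces A's mutable section_index counter and interleaved appends by building an explicit list of (title, body) sections and numbering them positionally with enumerate(sections, 1); the overview branch collapses into one template with an optional insert.
import Mathlib
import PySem

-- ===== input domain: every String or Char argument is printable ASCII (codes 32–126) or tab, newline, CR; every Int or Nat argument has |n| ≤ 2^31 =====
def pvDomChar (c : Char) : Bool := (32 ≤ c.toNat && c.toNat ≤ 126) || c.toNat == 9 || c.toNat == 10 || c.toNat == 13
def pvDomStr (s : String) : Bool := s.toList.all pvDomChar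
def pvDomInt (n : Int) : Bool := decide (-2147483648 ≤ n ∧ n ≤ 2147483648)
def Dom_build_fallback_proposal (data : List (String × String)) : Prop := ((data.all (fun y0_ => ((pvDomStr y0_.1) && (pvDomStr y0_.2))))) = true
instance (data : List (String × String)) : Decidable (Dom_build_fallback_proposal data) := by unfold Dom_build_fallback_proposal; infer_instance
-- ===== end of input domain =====

-- B restructures A's manual section_index counter into an explicit list of (title, body) sections numbered by enumerate (objective: alternative decomposition, same cost).


-- line.lstrip("- ") — hand port (PySem has no lstrip-with-chars); exact: drops leading '-' and ' ' characters
def pvLstripDashSpace (s : String) : String :=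
  String.ofList (s.toList.dropWhile (fun c => c == '-' || c == ' '))

-- ===== PORT A =====
def build_fallback_proposal (data : List (String × String)) : String :=
  let d := PySem.Dict.mk data
  let client := PySem.Str.strip (d.getD "client_name" "Client")
  let service := PySem.Str.strip (d.getD "service_type" "the requested work")
  let scope := PySem.Str.strip (d.getD "scope" "")
  let price := PySem.Str.strip (d.getD "price" "")
  let timeframe := PySem.Str.strip (d.getD "timeframe" "")
  let business := PySem.Str.strip (d.getD "your_business" "")
  let lines : List String := []
  let lines := lines ++ ["Proposal for: " ++ client]
  let lines := lines ++ [""]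
  let lines := lines ++ ["1. Overview"]
  let lines := lines ++
    [if business ≠ "" then
      "This proposal outlines the scope of works for " ++ service ++ " to be carried out by " ++ business ++ ". The work will be completed in accordance with standard trade practices and applicable requirements."
     else
      "This proposal outlines the scope of works for " ++ service ++ ". The work will be completed in accordance with standard trade practices and applicable requirements."]
  let lines := lines ++ [""]
  let lines := lines ++ ["2. Scope of Work"]
  let lines :=
    if scope ≠ "" then
      (PySem.Str.splitlines scope).foldl (fun acc line =>
        let clean := PySem.Str.strip (pvLstripDashSpace line)
        if clean ≠ "" then acc ++ ["- " ++ clean] else acc) lines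
    else lines ++ ["- Details to be confirmed"]
  let lines := lines ++ [""]
  let sectionIndex : Int := 3
  let p : List String × Int :=
    if timeframe ≠ "" then
      (lines ++ [PySem.Int.toStr sectionIndex ++ ". Timeframe"] ++ [timeframe] ++ [""], sectionIndex + 1)
    else (lines, sectionIndex)
  let lines := p.1
  let sectionIndex := p.2
  let lines := lines ++ [PySem.Int.toStr sectionIndex ++ ". Pricing"]
  let lines := lines ++ [if price ≠ "" then price else "Pricing to be confirmed."]
  let lines := lines ++ [""]
  let sectionIndex := sectionIndex + 1
  let lines := lines ++ [PySem.Int.toStr sectionIndex ++ ". Acceptance / Next Steps"]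
  let lines := lines ++ ["Please review the details above and contact us by phone or email to confirm acceptance or discuss any questions."]
  let lines := lines ++ [""]
  let lines := lines ++ ["Kind regards,"]
  let lines := if business ≠ "" then lines ++ [business] else lines
  PySem.Str.join "\n" lines

-- ===== PORT B =====
def build_fallback_proposal_alt (data : List (String × String)) : String :=
  let d := PySem.Dict.mk data
  let get := fun (key dflt : String) => PySem.Str.strip (d.getD key dflt)
  let client := get "client_name" "Client"
  let service := get "service_type" "the requested work"
  let scope := get "scope" ""
  let price := get "price" ""
  let timeframe := get "timeframe" ""
  let business := get "your_business" ""
  let by_ := if business ≠ "" then " to be carried out by " ++ business else ""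
  let overview : List String :=
    ["This proposal outlines the scope of works for " ++ service ++ by_ ++ ". The work will be completed in accordance with standard trade practices and applicable requirements."]
  let scopeBody : List String :=
    if scope ≠ "" then
      (((PySem.Str.splitlines scope).map (fun l => PySem.Str.strip (pvLstripDashSpace l))).filterMap
        (fun c => if c ≠ "" then some ("- " ++ c) else none))
    else ["- Details to be confirmed"]
  let sections : List (String × List String) :=
    [("Overview", overview), ("Scope of Work", scopeBody)]
      ++ (if timeframe ≠ "" then [("Timeframe", [timeframe])] else [])
      ++ [("Pricing", [if price ≠ "" then price else "Pricing to be confirmed."]),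
          ("Acceptance / Next Steps",
            ["Please review the details above and contact us by phone or email to confirm acceptance or discuss any questions."])]
  let out : List String :=
    ["Proposal for: " ++ client, ""]
      ++ (PySem.List.enumerate sections 1).flatMap
          (fun p => (PySem.Int.toStr p.1 ++ ". " ++ p.2.1) :: p.2.2 ++ [""])
      ++ ["Kind regards,"]
      ++ (if business ≠ "" then [business] else [])
  PySem.Str.join "\n" out

-- ===== PRECONDITION & SPEC =====
def Spec_build_fallback_proposal (data : List (String × String)) (out : String) : Prop := out = build_fallback_proposal_alt data
instance (data : List (String × String)) (out : String) : Decidable (Spec_build_fallback_proposal data out) := by unfold Spec_build_fallback_proposal; infer_instance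

-- ===== CLAIM (what is proved, stated in full; the proofs are below) =====
def Claim_equal_build_fallback_proposal : Prop := ∀ (data : List (String × String)), Dom_build_fallback_proposal data → Spec_build_fallback_proposal data (build_fallback_proposal data)

-- ===== LEMMAS AND PROOFS =====

-- A's scope loop appends exactly the filterMap B computes
theorem pv_scope_foldl (xs : List String) (init : List String) :
    xs.foldl (fun acc line =>
        let clean := PySem.Str.strip (pvLstripDashSpace line)
        if clean ≠ "" then acc ++ ["- " ++ clean] else acc) init
    = init ++ (xs.map (fun l => PySem.Str.strip (pvLstripDashSpace l))).filterMap
        (fun c => if c ≠ "" then some ("- " ++ c) else none) := by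
  induction xs generalizing init with
  | nil => simp only [List.foldl_nil, List.map_nil, List.filterMap_nil, List.append_nil]
  | cons x xs ih =>
    simp only [List.foldl_cons, List.map_cons, List.filterMap_cons]
    by_cases h : PySem.Str.strip (pvLstripDashSpace x) = ""
    · simp only [h, ne_eq, not_true_eq_false, if_false, ih]
    · simp only [ne_eq, h, not_false_eq_true, if_true, ih, List.append_assoc,
        List.singleton_append]

-- the two builds agree for arbitrary (already stripped) field values
set_option maxHeartbeats 2000000 in
theorem pv_core (client service scope price timeframe business : String) :
    (let lines : List String := []
     let lines := lines ++ ["Proposal for: " ++ client]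
     let lines := lines ++ [""]
     let lines := lines ++ ["1. Overview"]
     let lines := lines ++
       [if business ≠ "" then
         "This proposal outlines the scope of works for " ++ service ++ " to be carried out by " ++ business ++ ". The work will be completed in accordance with standard trade practices and applicable requirements."
        else
         "This proposal outlines the scope of works for " ++ service ++ ". The work will be completed in accordance with standard trade practices and applicable requirements."]
     let lines := lines ++ [""]
     let lines := lines ++ ["2. Scope of Work"]
     let lines :=
       if scope ≠ "" then
         (PySem.Str.splitlines scope).foldl (fun acc line =>
           let clean := PySem.Str.strip (pvLstripDashSpace line)
           if clean ≠ "" then acc ++ ["- " ++ clean] else acc) lines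
       else lines ++ ["- Details to be confirmed"]
     let lines := lines ++ [""]
     let sectionIndex : Int := 3
     let p : List String × Int :=
       if timeframe ≠ "" then
         (lines ++ [PySem.Int.toStr sectionIndex ++ ". Timeframe"] ++ [timeframe] ++ [""], sectionIndex + 1)
       else (lines, sectionIndex)
     let lines := p.1
     let sectionIndex := p.2
     let lines := lines ++ [PySem.Int.toStr sectionIndex ++ ". Pricing"]
     let lines := lines ++ [if price ≠ "" then price else "Pricing to be confirmed."]
     let lines := lines ++ [""]
     let sectionIndex := sectionIndex + 1
     let lines := lines ++ [PySem.Int.toStr sectionIndex ++ ". Acceptance / Next Steps"]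
     let lines := lines ++ ["Please review the details above and contact us by phone or email to confirm acceptance or discuss any questions."]
     let lines := lines ++ [""]
     let lines := lines ++ ["Kind regards,"]
     let lines := if business ≠ "" then lines ++ [business] else lines
     PySem.Str.join "\n" lines)
    =
    (let by_ := if business ≠ "" then " to be carried out by " ++ business else ""
     let overview : List String :=
       ["This proposal outlines the scope of works for " ++ service ++ by_ ++ ". The work will be completed in accordance with standard trade practices and applicable requirements."]
     let scopeBody : List String :=
       if scope ≠ "" then
         (((PySem.Str.splitlines scope).map (fun l => PySem.Str.strip (pvLstripDashSpace l))).filterMap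
           (fun c => if c ≠ "" then some ("- " ++ c) else none))
       else ["- Details to be confirmed"]
     let sections : List (String × List String) :=
       [("Overview", overview), ("Scope of Work", scopeBody)]
         ++ (if timeframe ≠ "" then [("Timeframe", [timeframe])] else [])
         ++ [("Pricing", [if price ≠ "" then price else "Pricing to be confirmed."]),
             ("Acceptance / Next Steps",
               ["Please review the details above and contact us by phone or email to confirm acceptance or discuss any questions."])]
     let out : List String :=
       ["Proposal for: " ++ client, ""]
         ++ (PySem.List.enumerate sections 1).flatMap
             (fun p => (PySem.Int.toStr p.1 ++ ". " ++ p.2.1) :: p.2.2 ++ [""])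
         ++ ["Kind regards,"]
         ++ (if business ≠ "" then [business] else [])
     PySem.Str.join "\n" out) := by
  simp only [pv_scope_foldl]
  by_cases hb : business = "" <;> by_cases hs : scope = "" <;>
  by_cases ht : timeframe = "" <;> by_cases hp : price = "" <;>
  · simp only [hb, hs, ht, hp, ne_eq, not_true_eq_false, not_false_eq_true, if_true, if_false,
      PySem.List.enumerate_cons, PySem.List.enumerate_nil, List.flatMap_cons, List.flatMap_nil,
      List.cons_append, List.nil_append, List.append_nil, List.append_assoc]
    congr 1
    simp only [List.cons.injEq, List.append_right_inj]
    and_intros <;> first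
      | rfl
      | (simp only [String.append_empty, String.append_assoc])

-- ===== VERDICT (by name: the statement is the Claim_ definition above) =====
theorem build_fallback_proposal_spec : Claim_equal_build_fallback_proposal := by
  intro data _
  show build_fallback_proposal data = build_fallback_proposal_alt data
  unfold build_fallback_proposal build_fallback_proposal_alt
  exact pv_core (PySem.Str.strip ((PySem.Dict.mk data).getD "client_name" "Client"))
    (PySem.Str.strip ((PySem.Dict.mk data).getD "service_type" "the requested work"))
    (PySem.Str.strip ((PySem.Dict.mk data).getD "scope" ""))
    (PySem.Str.strip ((PySem.Dict.mk data).getD "price" ""))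
    (PySem.Str.strip ((PySem.Dict.mk data).getD "timeframe" ""))
    (PySem.Str.strip ((PySem.Dict.mk data).getD "your_business" ""))
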